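-- pv_equiv track=rewrite | github.com/onooff/algorithm | boj/bj1891.py | get_v
-- ===== SOURCE A (Python) =====
-- def get_v(n, m):
--     ret = [0, 0]
--     d = 2**(n-1)
--     for i in range(n):
--         if m[i] == 1:
--             ret[0] += d
--             ret[1] += d
--         elif m[i] == 2:
--             ret[1] += d
--         elif m[i] == 4:
--             ret[0] += d
--         d //= 2
--     return ret
-- ===== SOURCE B (Python) =====
-- def get_v(n, m):
--     sx = ''.join('1' if m[i] in (1, 4) else '0' for i in range(n))
--     sy = ''.join('1' if m[i] in (1, 2) else '0' for i in range(n))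
--     return [int(sx or '0', 2), int(sy or '0', 2)]
-- ===== Notes on version B (the rewrite author's own statement) =====
-- stated objective: simpler
-- what changed: replaces A's running power-of-two weight accumulator (d = 2**(n-1), d //= 2 and conditional big-int additions into ret each step) with building two binary digit strings in one sweep and parsing each once with int(s, 2); this also avoids A's per-step n-bit big-int additions (O(n^2) bit operations) in favour of a single C-level parse
import Mathlib
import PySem

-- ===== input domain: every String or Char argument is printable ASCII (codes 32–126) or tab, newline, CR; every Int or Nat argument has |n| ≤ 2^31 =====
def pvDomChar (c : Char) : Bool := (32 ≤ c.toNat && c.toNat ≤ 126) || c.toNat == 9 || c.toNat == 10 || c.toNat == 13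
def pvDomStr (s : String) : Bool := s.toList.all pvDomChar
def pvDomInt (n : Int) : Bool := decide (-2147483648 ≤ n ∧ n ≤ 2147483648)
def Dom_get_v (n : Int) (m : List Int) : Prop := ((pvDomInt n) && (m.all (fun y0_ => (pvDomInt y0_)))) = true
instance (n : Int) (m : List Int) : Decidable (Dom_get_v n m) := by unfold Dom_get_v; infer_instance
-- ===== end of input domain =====

-- B replaces A's running power-of-two weight accumulation (d //= 2) by building two
-- binary digit strings in one sweep and parsing them as base-2 integers (objective: simpler).

-- ===== PORT A =====
def get_v (n : Int) (m : List Int) : List Int :=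
  -- ret = [0, 0]; d = 2**(n-1)  (for n ≤ 0 Python's d is a float and the loop is empty, so d is never used)
  -- for i in range(n): branch on m[i]; d //= 2
  let r := (PySem.List.pyRange 0 n 1).foldl
    (fun (st : Int × Int × Int) (i : Int) =>
      let q := PySem.List.pyGetD m i 0   -- m[i]; Pre_get_v keeps every accessed index in range
      let st1 :=
        if q = 1 then (st.1 + st.2.2, st.2.1 + st.2.2, st.2.2)
        else if q = 2 then (st.1, st.2.1 + st.2.2, st.2.2)
        else if q = 4 then (st.1 + st.2.2, st.2.1, st.2.2)
        else st
      (st1.1, st1.2.1, PySem.Int.floordiv st1.2.2 2))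
    ((0 : Int), (0 : Int), (2 : Int) ^ (n - 1).toNat)
  [r.1, r.2.1]

-- ===== PORT B =====
-- int(s, 2) for a string of '0'/'1' digits (the only strings B parses); exact on that domain
def parseBin (s : List Char) : Int :=
  s.foldl (fun a c => 2 * a + (if c = '1' then 1 else 0)) 0

def get_v_alt (n : Int) (m : List Int) : List Int :=
  let sx := (PySem.List.pyRange 0 n 1).map
    (fun i => if PySem.List.pyGetD m i 0 = 1 ∨ PySem.List.pyGetD m i 0 = 4 then '1' else '0')
  let sy := (PySem.List.pyRange 0 n 1).map
    (fun i => if PySem.List.pyGetD m i 0 = 1 ∨ PySem.List.pyGetD m i 0 = 2 then '1' else '0')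
  [parseBin (if sx = [] then ['0'] else sx), parseBin (if sy = [] then ['0'] else sy)]

-- ===== PRECONDITION & SPEC =====
-- Pre_ excludes exactly the inputs where Python A raises IndexError (m[i] for i < n out of range)
def Pre_get_v (n : Int) (m : List Int) : Prop := n ≤ (m.length : Int)
instance (n : Int) (m : List Int) : Decidable (Pre_get_v n m) := by unfold Pre_get_v; infer_instance

def pvWitness_get_v : Int × List Int := (2, [1, 3])

def Spec_get_v (n : Int) (m : List Int) (out : List Int) : Prop := out = get_v_alt n m
instance (n : Int) (m : List Int) (out : List Int) : Decidable (Spec_get_v n m out) := by unfold Spec_get_v; infer_instance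

-- ===== CLAIM (what is proved, stated in full; the proofs are below) =====
def Claim_equal_get_v : Prop := ∀ (n : Int) (m : List Int), Dom_get_v n m → Pre_get_v n m → Spec_get_v n m (get_v n m)

-- ===== LEMMAS AND PROOFS =====

-- 0/1 digit of the x-coordinate (resp. y) contributed by quadrant value q
def bitx (q : Int) : Int := if q = 1 ∨ q = 4 then 1 else 0
def bity (q : Int) : Int := if q = 1 ∨ q = 2 then 1 else 0

-- A's per-quadrant step, on the looked-up value
def stepA (st : Int × Int × Int) (q : Int) : Int × Int × Int :=
  let st1 :=
    if q = 1 then (st.1 + st.2.2, st.2.1 + st.2.2, st.2.2)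
    else if q = 2 then (st.1, st.2.1 + st.2.2, st.2.2)
    else if q = 4 then (st.1 + st.2.2, st.2.1, st.2.2)
    else st
  (st1.1, st1.2.1, PySem.Int.floordiv st1.2.2 2)

-- Horner accumulator shifting
lemma horner_shift (f : Int → Int) (qs : List Int) : ∀ (a : Int),
    qs.foldl (fun a q => 2 * a + f q) a = a * 2 ^ qs.length + qs.foldl (fun a q => 2 * a + f q) 0 := by
  induction qs with
  | nil => intro a; simp
  | cons q t ih =>
      intro a
      simp only [List.foldl_cons, List.length_cons]
      rw [ih (2 * a + f q), ih (2 * 0 + f q)]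
      ring

lemma floordiv_pow2 (k : Nat) : PySem.Int.floordiv ((2 : Int) ^ (k + 1)) 2 = 2 ^ k := by
  rw [PySem.Int.floordiv_eq_ediv_of_pos (by norm_num)]
  rw [pow_succ]
  omega

-- A's fold with the right starting weight computes Horner of both bit sequences
lemma stepA_fold (qs : List Int) : ∀ (r0 r1 : Int),
    (qs.foldl stepA (r0, r1, (2 : Int) ^ (qs.length - 1))).1
        = r0 + qs.foldl (fun a q => 2 * a + bitx q) 0 ∧
    (qs.foldl stepA (r0, r1, (2 : Int) ^ (qs.length - 1))).2.1
        = r1 + qs.foldl (fun a q => 2 * a + bity q) 0 := by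
  induction qs with
  | nil => intro r0 r1; simp
  | cons q t ih =>
      intro r0 r1
      have hd : (2 : Int) ^ ((q :: t).length - 1) = 2 ^ t.length := by simp
      have hstep : stepA (r0, r1, (2 : Int) ^ t.length) q
          = (r0 + bitx q * 2 ^ t.length, r1 + bity q * 2 ^ t.length,
             PySem.Int.floordiv ((2 : Int) ^ t.length) 2) := by
        simp only [stepA, bitx, bity]
        split_ifs with h1 h2 h3 <;> simp_all
      simp only [List.foldl_cons, hd, hstep]
      cases t with
      | nil => simp [bitx, bity]
      | cons u t' =>
          have hl : (u :: t').length = ((u :: t').length - 1) + 1 := by simp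
          have hfd : PySem.Int.floordiv ((2:Int) ^ (u :: t').length) 2
              = (2:Int) ^ ((u :: t').length - 1) := by
            have hlt : (u :: t').length = t'.length + 1 := rfl
            rw [hlt, floordiv_pow2]; simp
          rw [hfd]
          obtain ⟨hx, hy⟩ := ih (r0 + bitx q * 2 ^ (u :: t').length) (r1 + bity q * 2 ^ (u :: t').length)
          rw [hx, hy]
          constructor
          · rw [horner_shift bitx (u :: t') (2 * 0 + bitx q)]; ring
          · rw [horner_shift bity (u :: t') (2 * 0 + bity q)]; ring

-- parsing the bit characters is Horner of the bits
lemma parseBin_map (f : Int → Prop) [DecidablePred f] (l : List Int) :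
    parseBin (l.map (fun q => if f q then '1' else '0'))
      = l.foldl (fun a q => 2 * a + (if f q then 1 else 0)) 0 := by
  unfold parseBin
  rw [List.foldl_map]
  apply PySem.List.foldl_congr_mem
  intro a q _
  by_cases h : f q <;> simp [h]

theorem get_v_agrees (n : Int) (m : List Int) : get_v n m = get_v_alt n m := by
  by_cases hn : n ≤ 0
  · rw [get_v, get_v_alt, PySem.List.pyRange_one_eq_nil (by omega)]
    simp [parseBin]
  · replace hn : 0 < n := by omega
    rw [get_v, get_v_alt]
    set l := PySem.List.pyRange 0 n 1 with hl
    have hlen : l.length = n.toNat := by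
      rw [hl, PySem.List.length_pyRange_one]; omega
    have hne : l ≠ [] := by
      intro h; rw [h] at hlen; simp at hlen; omega
    -- turn A's index fold into a fold over the looked-up values
    set qs := l.map (fun i => PySem.List.pyGetD m i 0) with hqs
    have hpow : (n - 1).toNat = qs.length - 1 := by
      simp [hqs, hlen]
    have h1 : (l.foldl
        (fun (st : Int × Int × Int) (i : Int) =>
          let q := PySem.List.pyGetD m i 0
          let st1 :=
            if q = 1 then (st.1 + st.2.2, st.2.1 + st.2.2, st.2.2)
            else if q = 2 then (st.1, st.2.1 + st.2.2, st.2.2)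
            else if q = 4 then (st.1 + st.2.2, st.2.1, st.2.2)
            else st
          (st1.1, st1.2.1, PySem.Int.floordiv st1.2.2 2))
        ((0 : Int), (0 : Int), (2 : Int) ^ (n - 1).toNat))
        = qs.foldl stepA ((0 : Int), (0 : Int), (2 : Int) ^ (qs.length - 1)) := by
      rw [hpow, hqs, List.foldl_map]
      rfl
    rw [h1]
    obtain ⟨hx, hy⟩ := stepA_fold qs 0 0
    rw [hx, hy]
    have hsx : l.map (fun i => if PySem.List.pyGetD m i 0 = 1 ∨ PySem.List.pyGetD m i 0 = 4 then '1' else '0')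
        = qs.map (fun q => if q = 1 ∨ q = 4 then '1' else '0') := by
      simp [hqs, List.map_map, Function.comp]
    have hsy : l.map (fun i => if PySem.List.pyGetD m i 0 = 1 ∨ PySem.List.pyGetD m i 0 = 2 then '1' else '0')
        = qs.map (fun q => if q = 1 ∨ q = 2 then '1' else '0') := by
      simp [hqs, List.map_map, Function.comp]
    have hqsne : qs ≠ [] := by simp [hqs, hne]
    rw [hsx, hsy]
    rw [if_neg (by simp [hqsne]), if_neg (by simp [hqsne])]
    rw [parseBin_map (fun q => q = 1 ∨ q = 4) qs, parseBin_map (fun q => q = 1 ∨ q = 2) qs]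
    simp [bitx, bity]

-- ===== VERDICT (by name: the statement is the Claim_ definition above) =====
theorem get_v_spec : Claim_equal_get_v := by
  intro n m _ _
  unfold Spec_get_v
  exact get_v_agrees n m
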